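-- pv_equiv track=rewrite | github.com/Marcus5408/AP-CSP | U2/QuizPractice.py | sum_ignore_markers
-- ===== SOURCE A (Python) =====
-- def sum_ignore_markers(numbers:list, marker:int, delimiter:int):
--   sum = 0
--   ignored = False
--   for number in numbers:
--     if number != marker:
--       if not ignored:
--         sum += number
--       else:
--         if number == delimiter:
--           ignored = False
--     else:
--       ignored = True
--   return sum
-- ===== SOURCE B (Python) =====
-- def sum_ignore_markers(numbers: list, marker: int, delimiter: int):
--     # Search-and-slice: repeatedly locate the next marker with list.index,
--     # sum the clean prefix with sum(), then locate the closing delimiter and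
--     # slice everything up to (and including) it away.
--     total = 0
--     rest = numbers
--     while True:
--         try:
--             m = rest.index(marker)
--         except ValueError:
--             return total + sum(rest)
--         total += sum(rest[:m])
--         if delimiter == marker:
--             # an element equal to both counts as a marker, so nothing can close
--             return total
--         tail = rest[m + 1:]
--         try:
--             d = tail.index(delimiter)
--         except ValueError:
--             return total
--         rest = tail[d + 1:]
-- ===== Notes on version B (the rewrite author's own statement) =====
-- stated objective: alternative
-- what changed: Replaced A's elementwise state-machine pass (an `ignored` boolean flag updated per element) by a search-and-slice scheme: list.index finds the next marker, sum() totals the clean slice before it, list.index finds the closing delimiter in the remainder, and the loop continues on the slice past it.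
import Mathlib
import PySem

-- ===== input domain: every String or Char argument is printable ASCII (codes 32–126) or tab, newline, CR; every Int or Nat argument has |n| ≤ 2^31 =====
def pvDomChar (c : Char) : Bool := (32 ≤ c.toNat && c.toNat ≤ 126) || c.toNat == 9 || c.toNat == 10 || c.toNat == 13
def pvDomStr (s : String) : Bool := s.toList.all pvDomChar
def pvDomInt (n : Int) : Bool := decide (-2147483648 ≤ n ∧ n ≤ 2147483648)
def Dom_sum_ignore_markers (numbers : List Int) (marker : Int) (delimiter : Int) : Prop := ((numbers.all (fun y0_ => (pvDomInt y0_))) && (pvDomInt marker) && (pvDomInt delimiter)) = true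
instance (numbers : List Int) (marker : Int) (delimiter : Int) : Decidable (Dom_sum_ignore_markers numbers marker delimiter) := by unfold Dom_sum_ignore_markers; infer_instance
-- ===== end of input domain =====

-- B replaces A's per-element state machine by a search-and-slice scheme
-- (index the next marker, sum the clean slice, index the closing delimiter,
-- continue on the slice past it); objective: alternative.

-- ===== PORT A =====
-- A's for-loop over numbers with state (sum, ignored); branches in A's order.
def sum_ignore_markers (numbers : List Int) (marker : Int) (delimiter : Int) : Int :=
  (numbers.foldl
    (fun (st : Int × Bool) number =>
      if number ≠ marker then
        if st.2 = false then (st.1 + number, st.2)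
        else if number = delimiter then (st.1, false) else st
      else (st.1, true))
    (0, false)).1

-- ===== PORT B =====
-- Source B's while loop: rest.index(marker) / sum(rest[:m]) / tail.index(delimiter) / rest = tail[d+1:]
-- (rest[:m] and tail[d+1:] with 0 ≤ m, d are exactly take/drop).
theorem pvIdxLt {rest : List Int} {v : Int} {m : Nat}
    (h : PySem.List.index? rest v = some m) : m < rest.length :=
  (PySem.List.getElem_of_index?_eq_some h).1

def pvAltLoop (marker delimiter : Int) (rest : List Int) (total : Int) : Int :=
  match hm : PySem.List.index? rest marker with
  | none => total + rest.sum
  | some m =>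
    let total := total + (rest.take m).sum
    if delimiter = marker then total
    else
      let tail := rest.drop (m + 1)
      match PySem.List.index? tail delimiter with
      | none => total
      | some d => pvAltLoop marker delimiter (tail.drop (d + 1)) total
termination_by rest.length
decreasing_by
  have h1 : m < rest.length := pvIdxLt hm
  simp only [List.length_drop]
  omega

def sum_ignore_markers_alt (numbers : List Int) (marker : Int) (delimiter : Int) : Int :=
  pvAltLoop marker delimiter numbers 0

-- ===== PRECONDITION & SPEC =====
def Spec_sum_ignore_markers (numbers : List Int) (marker : Int) (delimiter : Int) (out : Int) : Prop := out = sum_ignore_markers_alt numbers marker delimiter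
instance (numbers : List Int) (marker : Int) (delimiter : Int) (out : Int) : Decidable (Spec_sum_ignore_markers numbers marker delimiter out) := by unfold Spec_sum_ignore_markers; infer_instance

-- ===== CLAIM (what is proved, stated in full; the proofs are below) =====
def Claim_equal_sum_ignore_markers : Prop := ∀ (numbers : List Int) (marker : Int) (delimiter : Int), Dom_sum_ignore_markers numbers marker delimiter → Spec_sum_ignore_markers numbers marker delimiter (sum_ignore_markers numbers marker delimiter)

-- ===== LEMMAS AND PROOFS =====

-- A's loop body, named for the proofs
def pvStepA (marker delimiter : Int) : Int × Bool → Int → Int × Bool :=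
  fun st number =>
    if number ≠ marker then
      if st.2 = false then (st.1 + number, st.2)
      else if number = delimiter then (st.1, false) else st
    else (st.1, true)

theorem pvSum_eq_foldl (numbers : List Int) (marker delimiter : Int) :
    sum_ignore_markers numbers marker delimiter
      = (numbers.foldl (pvStepA marker delimiter) (0, false)).1 := rfl

-- clean state, no marker present: the fold just sums
theorem pvClean_no_marker (marker delimiter : Int) :
    ∀ (l : List Int) (s : Int), marker ∉ l →
      l.foldl (pvStepA marker delimiter) (s, false) = (s + l.sum, false) := by
  intro l
  induction l with
  | nil => intro s _; simp
  | cons x xs ih =>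
      intro s hnm
      have hx : x ≠ marker := fun h => hnm (h ▸ List.mem_cons_self)
      have hstep : pvStepA marker delimiter (s, false) x = (s + x, false) := by
        unfold pvStepA; simp [hx]
      rw [List.foldl_cons, hstep, ih (s + x) (fun h => hnm (List.mem_cons_of_mem _ h))]
      simp [add_assoc]

-- ignored state, delimiter = marker: nothing can close the segment
theorem pvIgnored_same (marker : Int) :
    ∀ (l : List Int) (s : Int),
      l.foldl (pvStepA marker marker) (s, true) = (s, true) := by
  intro l
  induction l with
  | nil => intro s; simp
  | cons x xs ih =>
      intro s
      have hstep : pvStepA marker marker (s, true) x = (s, true) := by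
        unfold pvStepA
        by_cases hx : x = marker <;> simp [hx]
      rw [List.foldl_cons, hstep, ih]

-- ignored state, delimiter ∉ l (and delimiter ≠ marker): stays ignored
theorem pvIgnored_no_delim (marker delimiter : Int) :
    ∀ (l : List Int) (s : Int), delimiter ∉ l →
      l.foldl (pvStepA marker delimiter) (s, true) = (s, true) := by
  intro l
  induction l with
  | nil => intro s _; simp
  | cons x xs ih =>
      intro s hnd
      have hx : x ≠ delimiter := fun h => hnd (h ▸ List.mem_cons_self)
      have hstep : pvStepA marker delimiter (s, true) x = (s, true) := by
        unfold pvStepA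
        by_cases hm : x = marker <;> simp [hm, hx]
      rw [List.foldl_cons, hstep, ih s (fun h => hnd (List.mem_cons_of_mem _ h))]

-- main equivalence: B's loop from (rest, total) equals A's fold over rest in clean state
theorem pvLoop_eq (marker delimiter : Int) :
    ∀ (n : Nat) (rest : List Int) (total : Int), rest.length ≤ n →
      pvAltLoop marker delimiter rest total
        = (rest.foldl (pvStepA marker delimiter) (total, false)).1 := by
  intro n
  induction n with
  | zero =>
      intro rest total hle
      have : rest = [] := List.eq_nil_of_length_eq_zero (by omega)
      subst this
      rw [pvAltLoop]; simp
  | succ n ih =>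
      intro rest total hle
      rw [pvAltLoop]
      cases hm : PySem.List.index? rest marker with
      | none =>
          have hnm : marker ∉ rest := (PySem.List.index?_eq_none_iff _ _).mp hm
          simp only []
          rw [pvClean_no_marker marker delimiter rest total hnm]
      | some m =>
          obtain ⟨hmlt, hgetm, hbefore⟩ := PySem.List.getElem_of_index?_eq_some hm
          -- rest = take m ++ marker :: drop (m+1)
          have hsplit : rest = rest.take m ++ marker :: rest.drop (m + 1) := by
            conv_lhs => rw [← List.take_append_drop m rest]
            rw [List.drop_eq_getElem_cons hmlt, hgetm]
          have hnm_take : marker ∉ rest.take m := by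
            intro hmem
            obtain ⟨j, hj, hje⟩ := List.getElem_of_mem hmem
            have hjlt : j < m := by
              have h1 : j < (rest.take m).length := hj
              simp only [List.length_take] at h1
              omega
            exact hbefore j hjlt (by rw [← hje, List.getElem_take])
          have hfold1 :
              rest.foldl (pvStepA marker delimiter) (total, false)
                = (rest.drop (m+1)).foldl (pvStepA marker delimiter)
                    (total + (rest.take m).sum, true) := by
            conv_lhs => rw [hsplit]
            rw [List.foldl_append, pvClean_no_marker marker delimiter _ total hnm_take,
              List.foldl_cons]
            congr 1
            unfold pvStepA; simp
          by_cases hdm : delimiter = marker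
          · subst hdm
            rw [hfold1, pvIgnored_same]
            simp
          · simp only [if_neg hdm]
            cases hd : PySem.List.index? (rest.drop (m+1)) delimiter with
            | none =>
                have hnd : delimiter ∉ rest.drop (m+1) := (PySem.List.index?_eq_none_iff _ _).mp hd
                rw [hfold1, pvIgnored_no_delim marker delimiter _ _ hnd]
            | some d =>
                set tail := rest.drop (m+1) with htail
                obtain ⟨hdlt, hgetd, hdbefore⟩ := PySem.List.getElem_of_index?_eq_some hd
                have hsplit2 : tail = tail.take d ++ delimiter :: tail.drop (d + 1) := by
                  conv_lhs => rw [← List.take_append_drop d tail]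
                  rw [List.drop_eq_getElem_cons hdlt, hgetd]
                have hnd_take : delimiter ∉ tail.take d := by
                  intro hmem
                  obtain ⟨j, hj, hje⟩ := List.getElem_of_mem hmem
                  have hjd : j < d := by
                    have := List.length_take_le d tail
                    have : j < min d tail.length := by simpa using hj
                    omega
                  exact hdbefore j hjd (by rw [← hje, List.getElem_take])
                have hfold2 :
                    tail.foldl (pvStepA marker delimiter) (total + (rest.take m).sum, true)
                      = (tail.drop (d+1)).foldl (pvStepA marker delimiter)
                          (total + (rest.take m).sum, false) := by
                  conv_lhs => rw [hsplit2]
                  rw [List.foldl_append,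
                    pvIgnored_no_delim marker delimiter _ _ hnd_take,
                    List.foldl_cons]
                  congr 1
                  unfold pvStepA; simp [hdm]
                rw [hfold1, hfold2]
                have hlen : (tail.drop (d+1)).length ≤ n := by
                  simp only [htail, List.length_drop]; omega
                exact (ih _ _ hlen).symm ▸ rfl

-- ===== VERDICT (by name: the statement is the Claim_ definition above) =====
theorem sum_ignore_markers_spec : Claim_equal_sum_ignore_markers := by
  intro numbers marker delimiter _
  unfold Spec_sum_ignore_markers
  rw [pvSum_eq_foldl, sum_ignore_markers_alt,
    pvLoop_eq marker delimiter numbers.length numbers 0 (le_refl _)]
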